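-- pv_equiv track=rewrite | github.com/HarryAidanCSC/Advent-Of-Code | 21/day_21.py | create_new_stacks
-- ===== SOURCE A (Python) =====
-- def create_new_stacks(stack_input):
--     stack1 = [""]
--     for item in stack_input:
--         if len(item) == 1:
--             stack1 = [s1 + item[0] + "A" for s1 in stack1]
--         elif len(item) > 1:
--             stack1_1 = []
--             for i in item:
--                 stack1_1.extend([s1 + i + "A" for s1 in stack1])
--             stack1 = stack1_1
--     return stack1
-- ===== SOURCE B (Python) =====
-- def create_new_stacks(stack_input):
--     def combos(items):
--         if not items:
--             return [""]
--         return [c + "A" + suffix for suffix in combos(items[1:]) for c in items[0]]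
--     return combos([item for item in stack_input if item])
-- ===== Notes on version B (the rewrite author's own statement) =====
-- stated objective: idiomatic
-- what changed: Replaces the forward accumulator loop with its len==1/len>1 branching by a single recursive Cartesian-product builder over the non-empty items, assembling each string back-to-front as choice + 'A' + suffix.
import Mathlib
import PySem

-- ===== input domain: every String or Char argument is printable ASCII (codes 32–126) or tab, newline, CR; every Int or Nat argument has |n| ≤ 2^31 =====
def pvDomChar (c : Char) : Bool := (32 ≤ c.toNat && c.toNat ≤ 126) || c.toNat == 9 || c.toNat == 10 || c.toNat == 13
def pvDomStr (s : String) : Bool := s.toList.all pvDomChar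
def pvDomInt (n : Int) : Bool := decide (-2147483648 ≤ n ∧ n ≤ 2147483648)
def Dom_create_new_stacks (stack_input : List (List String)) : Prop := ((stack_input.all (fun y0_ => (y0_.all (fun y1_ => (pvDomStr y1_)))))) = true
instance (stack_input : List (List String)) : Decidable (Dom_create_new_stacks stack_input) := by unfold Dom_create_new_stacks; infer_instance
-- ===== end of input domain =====

-- B replaces A's forward accumulator loop (with len==1 / len>1 branches) by a recursive
-- Cartesian-product builder over the non-empty items, assembling each string as choice ++ "A" ++ suffix (alternative decomposition, same cost).
-- ===== PORT A =====
def create_new_stacks (stack_input : List (List String)) : List String :=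
  stack_input.foldl (fun stack1 item =>
    if item.length == 1 then
      -- item[0]: the branch guarantees length 1, so headD "" is exact
      stack1.map (fun s1 => s1 ++ item.headD "" ++ "A")
    else if item.length > 1 then
      item.flatMap (fun i => stack1.map (fun s1 => s1 ++ i ++ "A"))
    else stack1) [""]

-- ===== PORT B =====
def pvCombos : List (List String) → List String
  | [] => [""]
  | item :: rest => (pvCombos rest).flatMap (fun suffix => item.map (fun c => c ++ "A" ++ suffix))

def create_new_stacks_alt (stack_input : List (List String)) : List String :=
  pvCombos (stack_input.filter (fun item => !item.isEmpty))

-- ===== PRECONDITION & SPEC =====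
def Spec_create_new_stacks (stack_input : List (List String)) (out : List String) : Prop := out = create_new_stacks_alt stack_input
instance (stack_input : List (List String)) (out : List String) : Decidable (Spec_create_new_stacks stack_input out) := by unfold Spec_create_new_stacks; infer_instance

-- ===== CLAIM (what is proved, stated in full; the proofs are below) =====
def Claim_equal_create_new_stacks : Prop := ∀ (stack_input : List (List String)), Dom_create_new_stacks stack_input → Spec_create_new_stacks stack_input (create_new_stacks stack_input)

-- ===== LEMMAS AND PROOFS =====

-- ===== VERDICT (by name: the statement is the Claim_ definition above) =====
def pvStep (stack1 : List String) (item : List String) : List String :=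
  if item.length == 1 then
    stack1.map (fun s1 => s1 ++ item.headD "" ++ "A")
  else if item.length > 1 then
    item.flatMap (fun i => stack1.map (fun s1 => s1 ++ i ++ "A"))
  else stack1

theorem pvStep_nil (stack1 : List String) : pvStep stack1 [] = stack1 := by
  simp [pvStep]

theorem pvStep_ne_nil (stack1 item : List String) (h : item ≠ []) :
    pvStep stack1 item = item.flatMap (fun i => stack1.map (fun s1 => s1 ++ i ++ "A")) := by
  match item with
  | [x] => simp [pvStep]
  | x :: y :: t => simp [pvStep]

theorem pvFoldl_combos (items : List (List String)) (acc : List String) :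
    items.foldl pvStep acc =
      (pvCombos (items.filter (fun item => !item.isEmpty))).flatMap
        (fun s => acc.map (fun a => a ++ s)) := by
  induction items generalizing acc with
  | nil => simp [pvCombos]
  | cons item rest ih =>
    by_cases h : item = []
    · subst h
      simp [List.foldl_cons, pvStep_nil, ih]
    · have hne : (!item.isEmpty) = true := by
        simp [h]
      simp only [List.foldl_cons, List.filter_cons, hne, if_pos, pvCombos,
        pvStep_ne_nil _ _ h, ih]
      simp [List.flatMap_map, List.map_flatMap, List.flatMap_assoc, Function.comp_def,
        String.append_assoc]

theorem create_new_stacks_spec : Claim_equal_create_new_stacks := by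
  intro stack_input _
  show create_new_stacks stack_input = create_new_stacks_alt stack_input
  have : create_new_stacks stack_input = stack_input.foldl pvStep [""] := rfl
  rw [this, pvFoldl_combos]
  simp [create_new_stacks_alt]
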